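-- pv_equiv track=rewrite | github.com/charlie2233/RestaurantCommentValidation_Analysis | src/qsr_audit/reporting/scorecards.py | _global_validation_checks
-- ===== SOURCE A (Python) =====
-- from typing import Any
--
-- def _global_validation_checks(findings: tuple[dict[str, Any], ...]) -> dict[str, str]:
--     checks = {
--         "core_brand_metrics.rank_unique": "unknown",
--         "core_brand_metrics.brand_unique": "unknown",
--         "fte_range_order": "unknown",
--         "margin_range_order": "unknown",
--         "implied_auv_k": "unknown",
--     }
--     for finding in findings:
--         check_name = str(finding.get("check_name") or "")
--         severity = str(finding.get("severity") or "")
--         if check_name in checks: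
--             checks[check_name] = "failed" if severity == "error" else "passed"
--     return checks
-- ===== SOURCE B (Python) =====
-- def _global_validation_checks(findings):
--     # Build a last-write-wins index from normalized check_name -> normalized severity,
--     # then emit the status for each of the five known checks.
--     index = {str(f.get("check_name") or ""): str(f.get("severity") or "") for f in findings}
--     return {
--         name: ("unknown" if name not in index
--                else ("failed" if index[name] == "error" else "passed"))
--         for name in (
--             "core_brand_metrics.rank_unique",
--             "core_brand_metrics.brand_unique",
--             "fte_range_order",
--             "margin_range_order",
--             "implied_auv_k",
--         )
--     }
-- ===== Notes on version B (the rewrite author's own statement) =====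
-- stated objective: alternative
-- what changed: Instead of mutating a preinitialized status dict while looping over findings, B builds a last-write-wins name->severity index in one comprehension and then derives the status for each of the five fixed check names from that index.
import Mathlib
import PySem

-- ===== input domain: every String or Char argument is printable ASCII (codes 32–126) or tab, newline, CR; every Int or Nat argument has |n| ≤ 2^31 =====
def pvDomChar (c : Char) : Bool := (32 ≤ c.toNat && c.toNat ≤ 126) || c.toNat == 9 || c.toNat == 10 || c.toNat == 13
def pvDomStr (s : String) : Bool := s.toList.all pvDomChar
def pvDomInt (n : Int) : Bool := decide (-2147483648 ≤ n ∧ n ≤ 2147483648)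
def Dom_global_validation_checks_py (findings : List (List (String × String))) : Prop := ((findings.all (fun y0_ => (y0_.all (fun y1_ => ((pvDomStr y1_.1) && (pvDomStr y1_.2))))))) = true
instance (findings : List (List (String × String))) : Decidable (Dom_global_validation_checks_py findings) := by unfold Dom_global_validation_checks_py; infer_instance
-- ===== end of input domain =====

-- B replaces A's in-place mutation of a preinitialized status dict with a last-write-wins
-- name->severity index plus a map over the five fixed check names (alternative decomposition).

-- ===== PORT A =====
-- str(finding.get(k) or ""): the value is a string, so this is the lookup with default ""
def pvNorm (f : List (String × String)) (k : String) : String :=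
  ((PySem.Dict.mk f).get? k).getD ""

def global_validation_checks_py (findings : List (List (String × String))) : List (String × String) :=
  (findings.foldl (fun checks f =>
      let check_name := pvNorm f "check_name"
      let severity := pvNorm f "severity"
      if checks.contains check_name then
        checks.insert check_name (if severity == "error" then "failed" else "passed")
      else checks)
    (PySem.Dict.mk [("core_brand_metrics.rank_unique", "unknown"),
                    ("core_brand_metrics.brand_unique", "unknown"),
                    ("fte_range_order", "unknown"),
                    ("margin_range_order", "unknown"),
                    ("implied_auv_k", "unknown")])).items

-- ===== PORT B =====
def pvCheckNames : List String :=
  ["core_brand_metrics.rank_unique", "core_brand_metrics.brand_unique",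
   "fte_range_order", "margin_range_order", "implied_auv_k"]

def global_validation_checks_py_alt (findings : List (List (String × String))) : List (String × String) :=
  let index := findings.foldl
    (fun d f => d.insert (pvNorm f "check_name") (pvNorm f "severity"))
    PySem.Dict.empty
  pvCheckNames.map (fun name =>
    (name, match index.get? name with
           | none => "unknown"
           | some sev => if sev == "error" then "failed" else "passed"))

-- ===== PRECONDITION & SPEC =====
def Spec_global_validation_checks_py (findings : List (List (String × String))) (out : List (String × String)) : Prop := out = global_validation_checks_py_alt findings
instance (findings : List (List (String × String))) (out : List (String × String)) : Decidable (Spec_global_validation_checks_py findings out) := by unfold Spec_global_validation_checks_py; infer_instance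

-- ===== CLAIM (what is proved, stated in full; the proofs are below) =====
def Claim_equal_global_validation_checks_py : Prop := ∀ (findings : List (List (String × String))), Dom_global_validation_checks_py findings → Spec_global_validation_checks_py findings (global_validation_checks_py findings)

-- ===== LEMMAS AND PROOFS =====

-- status rendered from the index lookup (proof-side abbreviation of B's match)
def pvRender (o : Option String) : String :=
  match o with
  | none => "unknown"
  | some sev => if sev == "error" then "failed" else "passed"

-- A's loop state as a function of the index accumulated so far
def pvState (m : PySem.Dict String String) : PySem.Dict String String :=
  PySem.Dict.mk (pvCheckNames.map (fun n => (n, pvRender (m.get? n))))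

lemma pvState_keys (m : PySem.Dict String String) :
    (pvState m).keys = pvCheckNames := by
  unfold pvState
  rw [PySem.Dict.keys_mk, List.map_map]
  rfl

lemma pvState_step (m : PySem.Dict String String) (name sev : String) :
    (if (pvState m).contains name then
        (pvState m).insert name (if sev == "error" then "failed" else "passed")
      else pvState m)
    = pvState (m.insert name sev) := by
  rw [PySem.Dict.contains_eq_decide_mem_keys, pvState_keys]
  by_cases hmem : name ∈ pvCheckNames
  · rw [if_pos (by simpa using hmem)]
    apply PySem.Dict.ext
    rw [PySem.Dict.items_insert_of_contains _ _
        (by rw [PySem.Dict.contains_eq_decide_mem_keys, pvState_keys]; simpa using hmem)]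
    show List.map _ (pvCheckNames.map (fun n => (n, pvRender (m.get? n))))
        = pvCheckNames.map (fun n => (n, pvRender ((m.insert name sev).get? n)))
    rw [List.map_map]
    apply List.map_congr_left
    intro n _
    by_cases h : n = name
    · subst h
      simp [PySem.Dict.get?_insert_self, pvRender]
    · simp [h, PySem.Dict.get?_insert_of_ne m _ h, Function.comp]
  · rw [if_neg (by simpa using hmem)]
    unfold pvState
    congr 1
    apply List.map_congr_left
    intro n hn
    have hne : n ≠ name := fun h => hmem (h ▸ hn)
    rw [PySem.Dict.get?_insert_of_ne _ _ hne]

lemma pvFold_state (fs : List (List (String × String))) (m : PySem.Dict String String) :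
    fs.foldl (fun checks f =>
        let check_name := pvNorm f "check_name"
        let severity := pvNorm f "severity"
        if checks.contains check_name then
          checks.insert check_name (if severity == "error" then "failed" else "passed")
        else checks) (pvState m)
    = pvState (fs.foldl (fun d f => d.insert (pvNorm f "check_name") (pvNorm f "severity")) m) := by
  induction fs generalizing m with
  | nil => rfl
  | cons f fs ih =>
    simp only [List.foldl_cons]
    rw [pvState_step, ih]

-- ===== VERDICT (by name: the statement is the Claim_ definition above) =====
theorem global_validation_checks_py_spec : Claim_equal_global_validation_checks_py := by
  intro findings _
  unfold Spec_global_validation_checks_py global_validation_checks_py global_validation_checks_py_alt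
  have h0 : (PySem.Dict.mk [("core_brand_metrics.rank_unique", "unknown"),
                    ("core_brand_metrics.brand_unique", "unknown"),
                    ("fte_range_order", "unknown"),
                    ("margin_range_order", "unknown"),
                    ("implied_auv_k", "unknown")] : PySem.Dict String String)
      = pvState PySem.Dict.empty := by decide
  rw [h0, pvFold_state]
  simp [pvState, pvRender]
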